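-- pv_equiv track=rewrite | github.com/ma87/AoCEnergyMeasurement | 2018/ma87_python3/src/adc_5.py | get_polymer_after_reaction
-- ===== SOURCE A (Python) =====
-- character_delete = "!"
--
-- def get_next_letter(polymer, index, end_index):
--     for i in range(index + 1, end_index, 1):
--         if polymer[i] != character_delete:
--             return polymer[i], i
--     return None, None
--
-- def get_prev_index(polymer, index):
--     for i in range(index, -1, -1):
--         if polymer[i] != character_delete:
--             return i
--     return 0
--
-- def is_opposite_polarity(a, b):
--     if a.upper() == b.upper():
--         if a.isupper():
--             return b.islower()
--         else:
--             return b.isupper()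
--     else:
--         return False
--
-- def get_polymer_after_reaction(polymer):
--     all_reaction_done = False
--
--     current_index = 0
--     end_index = len(polymer)
--     while not all_reaction_done:
--         current_letter = polymer[current_index]
--         next_letter, index_next_letter = get_next_letter(polymer, current_index, end_index)
--         if next_letter is None:
--             all_reaction_done = True
--         else:
--             if is_opposite_polarity(current_letter, next_letter):
--                 polymer[current_index] = character_delete
--                 polymer[index_next_letter] = character_delete
--                 current_index = get_prev_index(polymer, current_index)
--             else:
--                 _unused, current_index = get_next_letter(polymer, current_index, end_index)
--
--     return "".join(polymer).replace(character_delete, "")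
-- ===== SOURCE B (Python) =====
-- character_delete = "!"
--
--
-- def is_opposite_polarity(a, b):
--     if a.upper() == b.upper():
--         if a.isupper():
--             return b.islower()
--         else:
--             return b.isupper()
--     else:
--         return False
--
--
-- def get_polymer_after_reaction(polymer):
--     # Single pass with a stack: push a unit, or pop when it annihilates the top.
--     stack = []
--     for unit in polymer:
--         if unit == character_delete:
--             continue
--         if stack and is_opposite_polarity(stack[-1], unit):
--             stack.pop()
--         else:
--             stack.append(unit)
--     return "".join(stack).replace(character_delete, "")
-- ===== Notes on version B (the rewrite author's own statement) =====
-- stated objective: faster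
-- what changed: A repeatedly re-scans a mutable list (marking reacted units '!' and walking back and forth with index searches, O(n^2)); B does one left-to-right pass with an explicit stack, popping when the next unit annihilates the top (O(n)).
import Mathlib
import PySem

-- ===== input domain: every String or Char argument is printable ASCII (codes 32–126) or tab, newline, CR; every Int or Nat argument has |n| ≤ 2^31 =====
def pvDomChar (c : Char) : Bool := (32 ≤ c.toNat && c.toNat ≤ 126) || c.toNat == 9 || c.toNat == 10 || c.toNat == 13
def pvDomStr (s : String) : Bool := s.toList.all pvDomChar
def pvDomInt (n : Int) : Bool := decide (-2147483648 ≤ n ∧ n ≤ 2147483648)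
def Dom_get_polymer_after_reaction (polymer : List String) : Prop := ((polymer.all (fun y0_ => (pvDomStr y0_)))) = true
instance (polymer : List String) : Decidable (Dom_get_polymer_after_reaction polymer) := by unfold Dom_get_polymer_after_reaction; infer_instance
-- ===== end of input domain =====

-- B replaces A's quadratic back-and-forth scan over a mutable list with a single stack pass (objective: faster).
-- A mutates its argument in place (reacted units overwritten with "!"); B does not — the equivalence proved here is about the RETURN value only.

-- ===== PORT A =====
def character_delete : String := "!"

-- Python str.isupper() / str.islower(): at least one cased character and no cased character of the
-- opposite case; exact on the printable-ASCII domain, where the cased characters are A-Z and a-z.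
def pyStrIsupper (s : String) : Bool :=
  s.toList.any PySem.Chars.isalpha && s.toList.all (fun c => !PySem.Chars.islower c)

def pyStrIslower (s : String) : Bool :=
  s.toList.any PySem.Chars.isalpha && s.toList.all (fun c => !PySem.Chars.isupper c)

def is_opposite_polarity (a b : String) : Bool :=
  if PySem.Str.upper a = PySem.Str.upper b then
    if pyStrIsupper a then pyStrIslower b else pyStrIsupper b
  else false

-- for i in range(index+1, end_index, 1): first non-"!" element, with its index
def get_next_letter_go (polymer : List String) : List Int → Option String × Option Int
  | [] => (none, none)
  | i :: rest =>
    match PySem.List.pyGet? polymer i with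
    | none => (none, none)   -- IndexError; unreachable for the in-range calls A makes
    | some c => if c ≠ character_delete then (some c, some i) else get_next_letter_go polymer rest

def get_next_letter (polymer : List String) (index endIndex : Int) : Option String × Option Int :=
  get_next_letter_go polymer (PySem.List.pyRange (index + 1) endIndex 1)

-- for i in range(index, -1, -1): first non-"!" element scanning backwards, else 0
def get_prev_index_go (polymer : List String) : List Int → Int
  | [] => 0
  | i :: rest =>
    match PySem.List.pyGet? polymer i with
    | none => get_prev_index_go polymer rest   -- IndexError; unreachable for the in-range calls A makes
    | some c => if c ≠ character_delete then i else get_prev_index_go polymer rest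

def get_prev_index (polymer : List String) (index : Int) : Int :=
  get_prev_index_go polymer (PySem.List.pyRange index (-1) (-1))

-- the while-loop of A; fuel polymer.length + 1 is proved sufficient below (each iteration
-- consumes one not-yet-deleted unit situated after the cursor)
def reactLoop (polymer : List String) (currentIndex endIndex : Int) : Nat → List String
  | 0 => polymer   -- fuel exhausted; never reached from get_polymer_after_reaction
  | fuel + 1 =>
    match PySem.List.pyGet? polymer currentIndex with
    | none => polymer   -- IndexError (empty list); excluded by Pre_
    | some currentLetter =>
      match get_next_letter polymer currentIndex endIndex with
      | (none, _) => polymer   -- all_reaction_done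
      | (some _, none) => polymer   -- unreachable: get_next_letter never returns (some, none)
      | (some nextLetter, some indexNextLetter) =>
        if is_opposite_polarity currentLetter nextLetter then
          reactLoop
            (PySem.List.pySetD (PySem.List.pySetD polymer currentIndex character_delete)
              indexNextLetter character_delete)
            (get_prev_index
              (PySem.List.pySetD (PySem.List.pySetD polymer currentIndex character_delete)
                indexNextLetter character_delete)
              currentIndex)
            endIndex fuel
        else
          match (get_next_letter polymer currentIndex endIndex).2 with
          | none => polymer   -- unreachable (same call just returned a some)
          | some j => reactLoop polymer j endIndex fuel

def get_polymer_after_reaction (polymer : List String) : String :=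
  let endIndex : Int := (polymer.length : Int)
  let final := reactLoop polymer 0 endIndex (polymer.length + 1)
  PySem.Str.replace (PySem.Str.join "" final) character_delete ""

-- ===== PORT B =====
-- one pass: push each unit on a stack, or pop when it annihilates the top
def get_polymer_after_reaction_alt_go (stack : List String) : List String → List String
  | [] => stack
  | unit :: rest =>
    if unit = character_delete then get_polymer_after_reaction_alt_go stack rest
    else
      match stack.getLast? with
      | some top =>
        if is_opposite_polarity top unit then get_polymer_after_reaction_alt_go stack.dropLast rest
        else get_polymer_after_reaction_alt_go (stack ++ [unit]) rest
      | none => get_polymer_after_reaction_alt_go (stack ++ [unit]) rest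

def get_polymer_after_reaction_alt (polymer : List String) : String :=
  PySem.Str.replace (PySem.Str.join "" (get_polymer_after_reaction_alt_go [] polymer)) character_delete ""

-- ===== PRECONDITION & SPEC =====
-- A evaluates polymer[0] before its loop, so it raises IndexError on the empty list; only that
-- input is excluded (B naturally returns "" there).
def Pre_get_polymer_after_reaction (polymer : List String) : Prop := polymer ≠ []
instance (polymer : List String) : Decidable (Pre_get_polymer_after_reaction polymer) := by
  unfold Pre_get_polymer_after_reaction; infer_instance

def pvWitness_get_polymer_after_reaction : List String := ["a", "A", "b"]

def Spec_get_polymer_after_reaction (polymer : List String) (out : String) : Prop := out = get_polymer_after_reaction_alt polymer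
instance (polymer : List String) (out : String) : Decidable (Spec_get_polymer_after_reaction polymer out) := by unfold Spec_get_polymer_after_reaction; infer_instance

-- ===== CLAIM (what is proved, stated in full; the proofs are below) =====
def Claim_equal_get_polymer_after_reaction : Prop := ∀ (polymer : List String), Dom_get_polymer_after_reaction polymer → Pre_get_polymer_after_reaction polymer → Spec_get_polymer_after_reaction polymer (get_polymer_after_reaction polymer)

-- ===== LEMMAS AND PROOFS =====

-- abbreviations for the proof: the stack (units at indices ≤ c not yet deleted) and the
-- remaining input (units at indices > c not yet deleted) encoded in A's loop state
def pvKeep : String → Bool := fun s => s ≠ character_delete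
def pvStack (p : List String) (c : Nat) : List String := (p.take (c + 1)).filter pvKeep
def pvRest (p : List String) (c : Nat) : List String := (p.drop (c + 1)).filter pvKeep

theorem pyGet_nat (p : List String) (c : Nat) (hc : c < p.length) :
    PySem.List.pyGet? p ((c : Nat) : Int) = some (p[c]'hc) := by
  rw [PySem.List.pyGet?_natCast]
  exact List.getElem?_eq_getElem hc

theorem toNat_ofNat_valid (n : Nat) (h : n < 55296) : (Char.ofNat n).toNat = n := by
  have hv : n.isValidChar := Or.inl h
  simp [Char.ofNat, hv, Char.ofNatAux, Char.toNat]

theorem upperChar_eq_bang {c : Char} (h : PySem.Chars.upperChar c = '!') : c = '!' := by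
  unfold PySem.Chars.upperChar PySem.Chars.islower at h
  split_ifs at h with hc
  · exfalso
    simp only [Bool.and_eq_true, decide_eq_true_eq] at hc
    have h1' : ('a' : Char).toNat ≤ c.toNat := hc.1
    have h2' : c.toNat ≤ ('z' : Char).toNat := hc.2
    have ha : ('a' : Char).toNat = 97 := by decide
    have hz : ('z' : Char).toNat = 122 := by decide
    have hval : (Char.ofNat (c.toNat - 32)).toNat = c.toNat - 32 :=
      toNat_ofNat_valid _ (by omega)
    have hcon := congrArg Char.toNat h
    rw [hval] at hcon
    have hb : ('!' : Char).toNat = 33 := by decide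
    omega
  · exact h

-- "!" (a deleted slot) never reacts with anything
theorem opp_del_left {y : String} (hy : y ≠ character_delete) :
    is_opposite_polarity character_delete y = false := by
  unfold is_opposite_polarity
  rw [if_neg]
  intro h
  apply hy
  have hu : PySem.Str.upper character_delete = "!" := by decide
  rw [hu] at h
  have h2 : (PySem.Str.upper y).toList = ['!'] := by rw [← h]; decide
  have h3 : PySem.Chars.upper y.toList = ['!'] := by
    rw [← PySem.Str.toList_upper]; exact h2
  unfold PySem.Chars.upper at h3
  cases hyl : y.toList with
  | nil => rw [hyl] at h3; simp at h3
  | cons ch cs =>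
    rw [hyl] at h3
    simp only [List.map_cons, List.cons.injEq, List.map_eq_nil_iff] at h3
    obtain ⟨hch, hcs⟩ := h3
    have hbang : ch = '!' := upperChar_eq_bang hch
    subst hbang hcs
    apply String.toList_injective
    rw [hyl]; decide

-- get_next_letter finds the first non-"!" unit at or after index a
theorem gnl_found (p : List String) (l1 : List String) : ∀ (a : Int) (l2 : List String)
    (y : String), 0 ≤ a → p.drop a.toNat = l1 ++ y :: l2 →
    (∀ s ∈ l1, s = character_delete) → y ≠ character_delete →
    get_next_letter_go p (PySem.List.pyRange a (p.length : Int) 1) =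
      (some y, some (a + l1.length)) := by
  induction l1 with
  | nil =>
    intro a l2 y h0 hd _ hy
    have hlen : p.length - a.toNat = l2.length + 1 := by
      have := congrArg List.length hd; simpa using this
    have htn : a.toNat < p.length := by omega
    have ha : a < (p.length : Int) := by omega
    rw [PySem.List.pyRange_one_cons ha, get_next_letter_go,
      PySem.List.pyGet?_of_nonneg p h0]
    have hg : p[a.toNat]? = some y := by
      have h1 := List.getElem?_drop (xs := p) (i := a.toNat) (j := 0)
      rw [hd] at h1
      simpa using h1.symm
    rw [hg]
    dsimp only
    rw [if_pos hy]
    simp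
  | cons s l1' ih =>
    intro a l2 y h0 hd hl1 hy
    have hs : s = character_delete := hl1 s (by simp)
    have hlen : p.length - a.toNat = l1'.length + l2.length + 2 := by
      have := congrArg List.length hd; simp at this; omega
    have htn : a.toNat < p.length := by omega
    have ha : a < (p.length : Int) := by omega
    rw [PySem.List.pyRange_one_cons ha, get_next_letter_go,
      PySem.List.pyGet?_of_nonneg p h0]
    have hg : p[a.toNat]? = some s := by
      have h1 := List.getElem?_drop (xs := p) (i := a.toNat) (j := 0)
      rw [hd] at h1
      simpa using h1.symm
    rw [hg]
    dsimp only
    rw [hs, if_neg (by simp)]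
    have hd' : p.drop (a + 1).toNat = l1' ++ y :: l2 := by
      have h1 : (a + 1).toNat = a.toNat + 1 := by omega
      rw [h1, ← List.drop_drop (j := a.toNat) (i := 1), hd]
      simp
    rw [ih (a + 1) l2 y (by omega) hd' (fun t ht => hl1 t (by simp [ht])) hy]
    simp only [Prod.mk.injEq, Option.some.injEq, List.length_cons, true_and]
    push_cast
    ring

theorem gnl_none (p : List String) : ∀ (k : Nat) (a : Int), 0 ≤ a →
    p.length ≤ a.toNat + k →
    (∀ s ∈ p.drop a.toNat, s = character_delete) →
    get_next_letter_go p (PySem.List.pyRange a (p.length : Int) 1) = (none, none) := by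
  intro k
  induction k with
  | zero =>
    intro a h0 hk _
    rw [PySem.List.pyRange_one_eq_nil (by omega), get_next_letter_go]
  | succ n ih =>
    intro a h0 hk hall
    by_cases ha : a < (p.length : Int)
    · have htn : a.toNat < p.length := by omega
      rw [PySem.List.pyRange_one_cons ha, get_next_letter_go,
        PySem.List.pyGet?_of_nonneg p h0]
      have hg0 : (p.drop a.toNat)[0]? = some (p[a.toNat]'htn) := by
        rw [List.getElem?_drop]
        simp only [Nat.add_zero]
        exact List.getElem?_eq_getElem htn
      have hmem : p[a.toNat]'htn ∈ p.drop a.toNat := List.mem_of_getElem? hg0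
      rw [List.getElem?_eq_getElem htn]
      dsimp only
      rw [hall _ hmem, if_neg (by simp)]
      apply ih (a + 1) (by omega) (by omega)
      intro s hs
      apply hall
      have h1 : (a + 1).toNat = a.toNat + 1 := by omega
      rw [h1] at hs
      rw [← List.drop_drop (j := a.toNat) (i := 1)] at hs
      exact List.mem_of_mem_drop hs
    · rw [PySem.List.pyRange_one_eq_nil (by omega), get_next_letter_go]

-- get_prev_index: result bounds, preservation of the encoded stack, and emptiness on the 0-fallback
theorem gpi_spec (p : List String) : ∀ (c : Nat), c < p.length →
    0 ≤ get_prev_index p (c : Int) ∧ get_prev_index p (c : Int) ≤ (c : Int) ∧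
    pvStack p (get_prev_index p (c : Int)).toNat = pvStack p c ∧
    (∀ v, p[(get_prev_index p (c : Int)).toNat]? = some v → v = character_delete →
      pvStack p (get_prev_index p (c : Int)).toNat = []) := by
  intro c
  induction c with
  | zero =>
    intro hlt
    unfold get_prev_index
    rw [PySem.List.pyRange_neg_one_cons (by omega), get_prev_index_go, pyGet_nat p 0 hlt]
    dsimp only
    by_cases hdel : p[0]'hlt = character_delete
    · rw [if_neg (fun hcon => hcon hdel)]
      rw [show ((0 : Nat) : Int) - 1 = -1 by omega,
        PySem.List.pyRange_neg_one_eq_nil (by omega)]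
      simp only [get_prev_index_go]
      refine ⟨by omega, by omega, rfl, ?_⟩
      intro v _ _
      unfold pvStack
      simp only [Int.toNat_zero]
      rw [List.take_succ_eq_append_getElem hlt]
      simp only [List.take_zero, List.nil_append]
      rw [List.filter_cons_of_neg (by simp [pvKeep, hdel])]
      rfl
    · rw [if_pos hdel]
      refine ⟨by omega, by omega, rfl, ?_⟩
      intro v hv hvd
      exfalso
      simp only [Int.toNat_natCast] at hv
      rw [List.getElem?_eq_getElem hlt] at hv
      injection hv with hv
      exact hdel (hv ▸ hvd)
  | succ c' ih =>
    intro hlt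
    unfold get_prev_index
    rw [PySem.List.pyRange_neg_one_cons (by omega), get_prev_index_go,
      pyGet_nat p (c' + 1) hlt]
    dsimp only
    by_cases hdel : p[c' + 1]'hlt = character_delete
    · rw [if_neg (fun hcon => hcon hdel)]
      have hstep : pvStack p (c' + 1) = pvStack p c' := by
        unfold pvStack
        rw [List.take_succ_eq_append_getElem hlt, List.filter_append,
          List.filter_cons_of_neg (by simp [pvKeep, hdel])]
        simp
      have hrange : ((c' + 1 : Nat) : Int) - 1 = ((c' : Nat) : Int) := by push_cast; ring
      rw [hrange]
      have hfold : get_prev_index_go p (PySem.List.pyRange ((c' : Nat) : Int) (-1) (-1)) =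
          get_prev_index p ((c' : Nat) : Int) := rfl
      rw [hfold]
      obtain ⟨ih1, ih2, ih3, ih4⟩ := ih (by omega)
      exact ⟨ih1, by omega, by rw [ih3, hstep], ih4⟩
    · rw [if_pos hdel]
      refine ⟨by omega, by omega, by simp, ?_⟩
      intro v hv hvd
      exfalso
      simp only [Int.toNat_natCast] at hv
      rw [List.getElem?_eq_getElem hlt] at hv
      injection hv with hv
      exact hdel (hv ▸ hvd)

-- B's stack pass ignores "!" units
theorem alt_go_filter (l : List String) : ∀ (s : List String),
    get_polymer_after_reaction_alt_go s l = get_polymer_after_reaction_alt_go s (l.filter pvKeep) := by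
  induction l with
  | nil => intro s; rfl
  | cons u t ih =>
    intro s
    by_cases hu : u = character_delete
    · rw [List.filter_cons_of_neg (by simp [pvKeep, hu]), get_polymer_after_reaction_alt_go,
        if_pos hu]
      exact ih s
    · rw [List.filter_cons_of_pos (by simp [pvKeep, hu]), get_polymer_after_reaction_alt_go,
        get_polymer_after_reaction_alt_go, if_neg hu, if_neg hu]
      cases s.getLast? with
      | none => exact ih _
      | some top =>
        dsimp only
        by_cases hopp : is_opposite_polarity top u = true
        · rw [if_pos hopp, if_pos hopp]; exact ih _
        · rw [if_neg hopp, if_neg hopp]; exact ih _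

-- elements of B's stack are never "!"
theorem alt_go_no_del (l : List String) : ∀ (s : List String),
    (∀ x ∈ s, x ≠ character_delete) →
    ∀ x ∈ get_polymer_after_reaction_alt_go s l, x ≠ character_delete := by
  induction l with
  | nil => intro s hs; exact hs
  | cons u t ih =>
    intro s hs
    rw [get_polymer_after_reaction_alt_go]
    by_cases hu : u = character_delete
    · rw [if_pos hu]; exact ih s hs
    · rw [if_neg hu]
      have hpush : ∀ x ∈ s ++ [u], x ≠ character_delete := by
        intro x hx
        rcases List.mem_append.mp hx with h | h
        · exact hs x h
        · simp only [List.mem_singleton] at h; subst h; exact hu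
      cases s.getLast? with
      | none => exact ih _ hpush
      | some top =>
        dsimp only
        by_cases hopp : is_opposite_polarity top u = true
        · rw [if_pos hopp]
          exact ih _ (fun x hx => hs x (List.dropLast_subset s hx))
        · rw [if_neg hopp]
          exact ih _ hpush

-- the loop invariant: A's remaining polymer, after discarding deleted slots, is what B's
-- stack pass produces from the stack/rest pair encoded in A's loop state
theorem main_invariant : ∀ (fuel : Nat) (p : List String) (c : Nat)
    (hc : c < p.length), (pvRest p c).length < fuel →
    ((p[c]'hc) = character_delete → pvStack p c = []) →
    (reactLoop p (c : Int) (p.length : Int) fuel).filter pvKeep =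
      get_polymer_after_reaction_alt_go (pvStack p c) (pvRest p c) := by
  intro fuel
  induction fuel with
  | zero => intro p c hc hfuel hinv; exact absurd hfuel (Nat.not_lt_zero _)
  | succ n ih =>
    intro p c hc hfuel hinv
    rw [reactLoop, pyGet_nat p c hc]
    dsimp only
    cases hrest : pvRest p c with
    | nil =>
      have hall : ∀ s ∈ p.drop (c + 1), s = character_delete := by
        intro s hs
        have := (List.filter_eq_nil_iff).mp hrest s hs
        simpa [pvKeep] using this
      have hg : get_next_letter p (c : Int) (p.length : Int) = (none, none) := by
        unfold get_next_letter
        exact gnl_none p p.length ((c : Int) + 1) (by omega) (by omega)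
          (fun s hs => hall s (by rwa [show ((c : Int) + 1).toNat = c + 1 by omega] at hs))
      rw [hg]
      dsimp only
      simp only [get_polymer_after_reaction_alt_go]
      calc p.filter pvKeep
          = (p.take (c + 1) ++ p.drop (c + 1)).filter pvKeep := by
            rw [List.take_append_drop]
        _ = pvStack p c ++ pvRest p c := by rw [List.filter_append]; rfl
        _ = pvStack p c := by rw [hrest, List.append_nil]
    | cons y r =>
      obtain ⟨l1, l2, hsplit, hl1, hy, hl2⟩ := List.filter_eq_cons_iff.mp hrest
      have hl1' : ∀ s ∈ l1, s = character_delete := by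
        intro s hs
        have := hl1 s hs
        simpa [pvKeep] using this
      have hyd : y ≠ character_delete := by simpa [pvKeep] using hy
      have h4 : l1.filter pvKeep = [] := by
        rw [List.filter_eq_nil_iff]
        intro a ha
        simp [pvKeep, hl1' a ha]
      have hdlen : p.length - (c + 1) = l1.length + l2.length + 1 := by
        have := congrArg List.length hsplit; simp at this; omega
      set i : Nat := c + 1 + l1.length with hi
      have hilt : i < p.length := by omega
      have hg : get_next_letter p (c : Int) (p.length : Int) = (some y, some ((i : Nat) : Int)) := by
        unfold get_next_letter
        have hgi : ((c : Int) + 1 + (l1.length : Int)) = ((i : Nat) : Int) := by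
          rw [hi]; push_cast; ring
        rw [gnl_found p l1 ((c : Int) + 1) l2 y (by omega)
          (by rwa [show ((c : Int) + 1).toNat = c + 1 by omega]) hl1' hyd]
        all_goals rw [hgi]
      rw [hg]
      dsimp only
      have hfl : r.length < n := by
        have := congrArg List.length hrest
        simp at this
        omega
      have hP : p = p.take (c + 1) ++ (l1 ++ y :: l2) := by
        conv_lhs => rw [← List.take_append_drop (c + 1) p]
        rw [hsplit]
      have htkc : p.take (c + 1) = p.take c ++ [p[c]'hc] := List.take_succ_eq_append_getElem hc
      have hPx : p = p.take c ++ (p[c]'hc :: (l1 ++ y :: l2)) := by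
        conv_lhs => rw [hP]
        rw [htkc, List.append_assoc, List.singleton_append]
      by_cases hopp : is_opposite_polarity (p[c]'hc) y = true
      · rw [if_pos hopp]
        have hx : (p[c]'hc) ≠ character_delete := by
          intro hxeq
          rw [hxeq, opp_del_left hyd] at hopp
          exact Bool.false_ne_true hopp
        have hstk : pvStack p c = List.filter pvKeep (p.take c) ++ [p[c]'hc] := by
          unfold pvStack
          rw [htkc, List.filter_append, List.filter_cons_of_pos (by simp [pvKeep, hx]),
            List.filter_nil]
        have hlast : (pvStack p c).getLast? = some (p[c]'hc) := by
          rw [hstk]; exact List.getLast?_concat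
        have hdropl : (pvStack p c).dropLast = List.filter pvKeep (p.take c) := by
          rw [hstk]; exact List.dropLast_concat
        have hsets : PySem.List.pySetD (PySem.List.pySetD p ((c : Nat) : Int) character_delete)
            ((i : Nat) : Int) character_delete = (p.set c character_delete).set i character_delete := by
          rw [PySem.List.pySetD_natCast, PySem.List.pySetD_natCast]
        rw [hsets]
        set p' : List String := (p.set c character_delete).set i character_delete with hp'def
        have hplen : p'.length = p.length := by rw [hp'def]; simp
        have e1 : p.set c character_delete =
            p.take c ++ (character_delete :: (l1 ++ y :: l2)) := by
          conv_lhs => rw [hPx]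
          rw [List.set_append_right _ _ (by simp)]
          congr 1
          rw [show c - (p.take c).length = 0 from by simp [List.length_take]; omega]
          rw [List.set_cons_zero]
        have e2 : p' = p.take c ++ (character_delete :: (l1 ++ character_delete :: l2)) := by
          rw [hp'def, e1]
          rw [List.set_append_right _ _ (by simp [List.length_take]; omega)]
          congr 1
          rw [show i - (p.take c).length = l1.length + 1 from by simp [List.length_take]; omega]
          rw [List.set_cons_succ]
          congr 1
          rw [List.set_append_right _ _ (le_refl _)]
          rw [show l1.length - l1.length = 0 from by omega, List.set_cons_zero]
        have hTlen : (p.take c).length = c := by simp [List.length_take]; omega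
        have stack' : pvStack p' c = List.filter pvKeep (p.take c) := by
          unfold pvStack
          rw [e2, List.take_append, List.take_of_length_le (by omega)]
          rw [show c + 1 - (p.take c).length = 1 from by omega]
          have h1 : (character_delete :: (l1 ++ character_delete :: l2)).take 1 =
              [character_delete] := rfl
          rw [h1, List.filter_append, List.filter_cons_of_neg (by simp [pvKeep]),
            List.filter_nil, List.append_nil]
        have rest' : pvRest p' c = r := by
          unfold pvRest
          rw [e2, List.drop_append, List.drop_eq_nil_of_le (by omega)]
          rw [show c + 1 - (p.take c).length = 1 from by omega]
          have h1 : (character_delete :: (l1 ++ character_delete :: l2)).drop 1 =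
              l1 ++ character_delete :: l2 := rfl
          rw [h1, List.nil_append, List.filter_append, h4,
            List.filter_cons_of_neg (by simp [pvKeep]), List.nil_append, hl2]
        obtain ⟨hj0, hjle, hjstack, hjinv⟩ := gpi_spec p' c (by rw [hplen]; exact hc)
        set j : Int := get_prev_index p' ((c : Nat) : Int) with hjdef
        have hjlt : j.toNat < p'.length := by rw [hplen]; omega
        have hs2 : pvStack p' j.toNat = (pvStack p c).dropLast := by
          rw [hjstack, stack', ← hdropl]
        have hr2 : pvRest p' j.toNat = r := by
          have hsplit' : pvStack p' j.toNat ++ pvRest p' j.toNat =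
              pvStack p' c ++ pvRest p' c := by
            unfold pvStack pvRest
            rw [← List.filter_append, ← List.filter_append, List.take_append_drop,
              List.take_append_drop]
          rw [hjstack] at hsplit'
          rw [List.append_cancel_left hsplit', rest']
        have hinv' : (p'[j.toNat]'hjlt) = character_delete → pvStack p' j.toNat = [] :=
          fun hdel' => hjinv _ (List.getElem?_eq_getElem hjlt) hdel'
        have hrhs : get_polymer_after_reaction_alt_go (pvStack p c) (y :: r) =
            get_polymer_after_reaction_alt_go ((pvStack p c).dropLast) r := by
          rw [get_polymer_after_reaction_alt_go, if_neg hyd, hlast]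
          simp only [hopp, if_true]
        rw [hrhs, ← hs2, ← hr2]
        rw [show ((p.length : Nat) : Int) = ((p'.length : Nat) : Int) from by rw [hplen]]
        rw [← Int.toNat_of_nonneg hj0]
        exact ih p' j.toNat hjlt (by rw [hr2]; exact hfl) hinv'
      · rw [if_neg hopp]
        have hstk : pvStack p i = pvStack p c ++ [y] := by
          unfold pvStack
          conv_lhs => rw [hP]
          rw [List.take_append, List.take_of_length_le (by simp [List.length_take]; omega)]
          rw [show i + 1 - (p.take (c + 1)).length = l1.length + 1 from by
            simp [List.length_take]; omega]
          rw [show (l1 ++ y :: l2).take (l1.length + 1) = l1 ++ [y] from by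
            rw [List.take_append, List.take_of_length_le (by omega)]
            simp]
          rw [List.filter_append, List.filter_append, h4, List.nil_append,
            List.filter_cons_of_pos hy, List.filter_nil]
        have hrst : pvRest p i = r := by
          unfold pvRest
          conv_lhs => rw [hP]
          rw [List.drop_append, List.drop_eq_nil_of_le (by simp [List.length_take]; omega)]
          rw [show i + 1 - (p.take (c + 1)).length = l1.length + 1 from by
            simp [List.length_take]; omega]
          rw [show (l1 ++ y :: l2).drop (l1.length + 1) = l2 from by
            rw [List.drop_append, List.drop_eq_nil_of_le (by omega)]
            simp]
          rw [List.nil_append, hl2]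
        have hpiq : p[i]? = some y := by
          have h1 := List.getElem?_drop (xs := p) (i := c + 1) (j := l1.length)
          rw [hsplit] at h1
          rw [List.getElem?_append_right (le_refl _)] at h1
          simp only [Nat.sub_self, List.getElem?_cons_zero] at h1
          rw [← h1]
        have hinv2 : (p[i]'hilt) = character_delete → pvStack p i = [] := by
          intro hid
          exfalso
          rw [List.getElem?_eq_getElem hilt] at hpiq
          injection hpiq with hpiq
          exact hyd (hpiq ▸ hid)
        have hstep : get_polymer_after_reaction_alt_go (pvStack p c) (y :: r) =
            get_polymer_after_reaction_alt_go (pvStack p c ++ [y]) r := by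
          rw [get_polymer_after_reaction_alt_go, if_neg hyd]
          by_cases hxdel : (p[c]'hc) = character_delete
          · rw [hinv hxdel]
            rfl
          · have hlast : (pvStack p c).getLast? = some (p[c]'hc) := by
              unfold pvStack
              rw [htkc, List.filter_append, List.filter_cons_of_pos (by simp [pvKeep, hxdel]),
                List.filter_nil]
              exact List.getLast?_concat
            rw [hlast]
            have hof : is_opposite_polarity (p[c]'hc) y = false := Bool.eq_false_iff.mpr hopp
            simp only [hof, Bool.false_eq_true, if_false]
        rw [hstep, ← hstk, ← hrst]
        exact ih p i hilt (by rw [hrst]; exact hfl) hinv2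

-- str.replace(s, "!", "") removes exactly the '!' characters
theorem replace_go_del (fuel : Nat) : ∀ (l acc : List Char), l.length ≤ fuel →
    PySem.Chars.replace.go ['!'] [] fuel l acc = acc.reverse ++ l.filter (fun ch => ch ≠ '!') := by
  induction fuel with
  | zero => intro l acc h; rw [PySem.Chars.replace.go.eq_def]; simp at h; simp [h]
  | succ n ih =>
    intro l acc h
    match l with
    | [] => rw [PySem.Chars.replace.go.eq_def]; simp
    | c :: t =>
      rw [PySem.Chars.replace.go.eq_def]
      dsimp only
      by_cases hc : c = '!'
      · subst hc
        have hp : List.isPrefixOf ['!'] ('!' :: t) = true := by simp [List.isPrefixOf]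
        rw [if_pos hp]
        have hdrop : List.drop ['!'].length ('!' :: t) = t := rfl
        rw [hdrop, show ([] : List Char).reverse ++ acc = acc from by simp]
        rw [ih t acc (by simpa using h)]
        simp
      · have hp : List.isPrefixOf ['!'] (c :: t) = false := by
          simp [List.isPrefixOf]; exact fun hh => hc hh.symm
        rw [if_neg (by simp [hp])]
        rw [ih t (c :: acc) (by simpa using h)]
        simp [hc]

theorem replace_del (cs : List Char) :
    PySem.Chars.replace cs ['!'] [] = cs.filter (fun ch => ch ≠ '!') := by
  unfold PySem.Chars.replace
  simp only [List.isEmpty_cons]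
  simpa using replace_go_del cs.length cs [] le_rfl

theorem flatten_intersperse_nil (l : List (List Char)) : (l.intersperse []).flatten = l.flatten := by
  induction l with
  | nil => simp
  | cons x t ih =>
    cases t with
    | nil => simp
    | cons y zs =>
      simp only [List.intersperse_cons₂, List.flatten_cons, List.nil_append] at *
      rw [ih]

theorem join_empty_toList (l : List String) :
    (PySem.Str.join "" l).toList = (l.map String.toList).flatten := by
  have h : (PySem.Str.join "" l).toList = PySem.Chars.join "".toList (l.map String.toList) := by
    simp [PySem.Str.join]
  rw [h]
  show (List.intercalate [] (l.map String.toList)) = _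
  rw [List.intercalate]
  exact flatten_intersperse_nil _

-- dropping "!" units before flattening does not change the '!'-free character stream
theorem flatten_filter (l : List String) :
    ((l.filter pvKeep).map String.toList).flatten.filter (fun ch => ch ≠ '!') =
      (l.map String.toList).flatten.filter (fun ch => ch ≠ '!') := by
  induction l with
  | nil => rfl
  | cons x t ih =>
    by_cases hx : x = character_delete
    · subst hx
      have h1 : List.filter pvKeep (character_delete :: t) = List.filter pvKeep t := by
        rw [List.filter_cons_of_neg (by simp [pvKeep])]
      have h2 : List.filter (fun ch => decide (ch ≠ '!')) character_delete.toList = [] := by decide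
      rw [h1, List.map_cons, List.flatten_cons, List.filter_append, h2, List.nil_append, ih]
    · have h1 : List.filter pvKeep (x :: t) = x :: List.filter pvKeep t := by
        rw [List.filter_cons_of_pos (by simp [pvKeep, hx])]
      rw [h1, List.map_cons, List.map_cons, List.flatten_cons, List.flatten_cons,
        List.filter_append, List.filter_append, ih]

-- the two final strings agree once the retained units agree
theorem final_strings_eq (fa fb : List String) (h : fa.filter pvKeep = fb.filter pvKeep) :
    PySem.Str.replace (PySem.Str.join "" fa) character_delete "" =
      PySem.Str.replace (PySem.Str.join "" fb) character_delete "" := by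
  unfold PySem.Str.replace
  congr 1
  rw [show character_delete.toList = ['!'] from by decide,
    show ("" : String).toList = ([] : List Char) from by decide,
    replace_del, replace_del, join_empty_toList, join_empty_toList,
    ← flatten_filter fa, ← flatten_filter fb, h]

-- ===== VERDICT (by name: the statement is the Claim_ definition above) =====
theorem get_polymer_after_reaction_spec : Claim_equal_get_polymer_after_reaction := by
  intro polymer _ hpre
  unfold Spec_get_polymer_after_reaction
  unfold get_polymer_after_reaction get_polymer_after_reaction_alt
  apply final_strings_eq
  have hne : polymer ≠ [] := hpre
  have hlen : 0 < polymer.length := List.length_pos_of_ne_nil hne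
  have hnodel : ∀ x ∈ get_polymer_after_reaction_alt_go [] polymer, pvKeep x = true := by
    intro x hx
    have := alt_go_no_del polymer [] (by simp) x hx
    simpa [pvKeep] using this
  rw [List.filter_eq_self.mpr hnodel]
  have hfl : (pvRest polymer 0).length < polymer.length + 1 := by
    unfold pvRest
    have h1 := List.length_filter_le pvKeep (polymer.drop (0 + 1))
    have h2 := List.length_drop (l := polymer) (i := 0 + 1)
    omega
  have hin : (polymer[0]'hlen) = character_delete → pvStack polymer 0 = [] := by
    intro hdel
    unfold pvStack
    rw [List.take_succ_eq_append_getElem hlen]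
    simp only [List.take_zero, List.nil_append]
    rw [List.filter_cons_of_neg (by simp [pvKeep, hdel])]
    rfl
  rw [show (0 : Int) = ((0 : Nat) : Int) from rfl]
  rw [main_invariant (polymer.length + 1) polymer 0 hlen hfl hin]
  rw [alt_go_filter polymer []]
  cases hp : polymer with
  | nil => exact absurd hp hne
  | cons x t =>
    have hs : pvStack (x :: t) 0 = List.filter pvKeep [x] := by unfold pvStack; rfl
    have hr : pvRest (x :: t) 0 = t.filter pvKeep := by unfold pvRest; rfl
    rw [hs, hr]
    by_cases hx : x = character_delete
    · rw [List.filter_cons_of_neg (by simp [pvKeep, hx]),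
        List.filter_cons_of_neg (by simp [pvKeep, hx]), List.filter_nil]
    · rw [List.filter_cons_of_pos (by simp [pvKeep, hx]),
        List.filter_cons_of_pos (by simp [pvKeep, hx]), List.filter_nil]
      conv_rhs => rw [get_polymer_after_reaction_alt_go]
      rw [if_neg hx]
      rfl
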